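-- pv_equiv track=rewrite | github.com/ruyimarone/data-portraits | dataportraits/datasketch.py | chain_overlaps
-- ===== SOURCE A (Python) =====
-- def check_chain(membership_tests, index, step, accumulator):
--     if index >= len(membership_tests):
--         return accumulator
--
--     is_member = membership_tests[index][0]
--     if is_member:
--         accumulator.append(index)
--         return check_chain(membership_tests, index + step, step, accumulator)
--
--     return accumulator
--
-- def chain_overlaps(membership_tests, width):
--     already_found = set()
--     matches = []
--     idxs = []
--     for ix, (_, _) in enumerate(membership_tests):
--         if ix in already_found:
--             continue
--
--         run_idxs = check_chain(membership_tests, ix, step=width, accumulator=[])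
--
--         if len(run_idxs) == 0:
--             continue
--
--         run_segments =  [membership_tests[i][1] for i in run_idxs]
--         matches.append(run_segments)
--         idxs.append(run_idxs)
--         already_found.update(run_idxs)
--
--     return matches, idxs
-- ===== SOURCE B (Python) =====
-- def chain_overlaps(membership_tests, width):
--     n = len(membership_tests)
--     chains = {}
--     for ix in range(n - 1, -1, -1):
--         if membership_tests[ix][0]:
--             chains[ix] = [ix] + chains.get(ix + width, [])
--     matches = []
--     idxs = []
--     for ix in range(n):
--         run = chains.get(ix)
--         if run is not None and (ix < width or not membership_tests[ix - width][0]):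
--             matches.append([membership_tests[i][1] for i in run])
--             idxs.append(run)
--     return matches, idxs
-- ===== Notes on version B (the rewrite author's own statement) =====
-- stated objective: alternative
-- what changed: Replaces A's per-start recursive chain re-walk plus a mutable already-found set by a single backward dynamic-programming pass that memoises the chain starting at every member index in a dict, then one forward pass that emits a chain exactly at chain starts, recognised locally by 'predecessor ix-width is not a member' instead of a found-set lookup.
-- outside the precondition, e.g. on chain_overlaps([(False, 'a'), (True, 'b')], -1): A returns ([['b']], [[1]]), B raises IndexError; on chain_overlaps([(True, 'a')], 0): A raises RecursionError, B returns ([], [])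
import Mathlib
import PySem

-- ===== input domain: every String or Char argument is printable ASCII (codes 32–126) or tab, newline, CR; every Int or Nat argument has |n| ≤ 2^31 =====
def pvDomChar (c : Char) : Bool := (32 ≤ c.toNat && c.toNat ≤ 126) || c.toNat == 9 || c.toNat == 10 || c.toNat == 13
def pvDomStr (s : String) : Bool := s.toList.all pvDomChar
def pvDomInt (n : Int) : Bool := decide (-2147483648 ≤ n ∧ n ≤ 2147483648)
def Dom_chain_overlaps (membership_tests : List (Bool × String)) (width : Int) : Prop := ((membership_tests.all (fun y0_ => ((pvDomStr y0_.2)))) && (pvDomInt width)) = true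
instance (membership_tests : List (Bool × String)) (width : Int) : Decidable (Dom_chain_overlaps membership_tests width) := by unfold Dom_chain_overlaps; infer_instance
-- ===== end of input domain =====

-- B replaces A's recursive per-start chain walk + already-found set by one backward
-- memoising pass over the indices and a local chain-start test (alternative decomposition,
-- same asymptotic cost).

-- ===== PORT A =====
-- fuel = membership_tests.length + 1 bounds the recursion depth; inside Pre_ (width ≥ 1)
-- the index rises by width ≥ 1 each call, so the fuel is never exhausted.
def check_chain (membership_tests : List (Bool × String)) (index step : Int) (accumulator : List Int) (fuel : Nat) : List Int :=
  match fuel with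
  | 0 => accumulator
  | Nat.succ f =>
    if (membership_tests.length : Int) ≤ index then accumulator
    else
      match PySem.List.pyGet? membership_tests index with
      | none => accumulator  -- IndexError (index < -len): unreachable inside Pre_
      | some (is_member, _) =>
        if is_member then
          check_chain membership_tests (index + step) step (accumulator ++ [index]) f
        else accumulator

def chain_overlaps (membership_tests : List (Bool × String)) (width : Int) : List (List String) × List (List Int) :=
  let st := (PySem.List.enumerate membership_tests 0).foldl
    (fun st p =>
      if PySem.Set.contains st.1 p.1 then st
      else
        let run := check_chain membership_tests p.1 width [] (membership_tests.length + 1)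
        if run.length = 0 then st
        else (PySem.Set.update st.1 run,
              st.2.1 ++ [run.map (fun i => ((PySem.List.pyGet? membership_tests i).map Prod.snd).getD "")],  -- getD "" unreachable: i is in range
              st.2.2 ++ [run]))
    ((PySem.Set.empty : PySem.Set Int), (([] : List (List String)), ([] : List (List Int))))
  (st.2.1, st.2.2)

-- ===== PORT B =====
def chain_overlaps_alt (membership_tests : List (Bool × String)) (width : Int) : List (List String) × List (List Int) :=
  let n : Int := membership_tests.length
  let chains : PySem.Dict Int (List Int) :=
    (PySem.List.pyRange (n - 1) (-1) (-1)).foldl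
      (fun d ix =>
        if ((PySem.List.pyGet? membership_tests ix).map Prod.fst).getD false then
          PySem.Dict.insert d ix (ix :: PySem.Dict.getD d (ix + width) [])
        else d)
      PySem.Dict.empty
  (PySem.List.pyRange 0 n 1).foldl
    (fun st ix =>
      match PySem.Dict.get? chains ix with
      | none => st
      | some run =>
        if decide (ix < width) || !(((PySem.List.pyGet? membership_tests (ix - width)).map Prod.fst).getD false) then
          (st.1 ++ [run.map (fun i => ((PySem.List.pyGet? membership_tests i).map Prod.snd).getD "")],
           st.2 ++ [run])
        else st)
    (([] : List (List String)), ([] : List (List Int)))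

-- ===== PRECONDITION & SPEC =====
-- Pre_ excludes width ≤ 0, where A's stepping stands still or walks through negative
-- indices: there A diverges (RecursionError), raises IndexError, or returns a value that
-- is an artefact of negative-index wraparound which B's forward scan cannot produce.
def Pre_chain_overlaps (membership_tests : List (Bool × String)) (width : Int) : Prop := 1 ≤ width
instance (membership_tests : List (Bool × String)) (width : Int) : Decidable (Pre_chain_overlaps membership_tests width) := by unfold Pre_chain_overlaps; infer_instance

def pvWitness_chain_overlaps : (List (Bool × String)) × Int := ([(true, "a"), (false, "b"), (true, "c"), (true, "d")], 2)

def Spec_chain_overlaps (membership_tests : List (Bool × String)) (width : Int) (out : List (List String) × List (List Int)) : Prop := out = chain_overlaps_alt membership_tests width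
instance (membership_tests : List (Bool × String)) (width : Int) (out : List (List String) × List (List Int)) : Decidable (Spec_chain_overlaps membership_tests width out) := by unfold Spec_chain_overlaps; infer_instance

-- ===== CLAIM (what is proved, stated in full; the proofs are below) =====
def Claim_equal_chain_overlaps : Prop := ∀ (membership_tests : List (Bool × String)) (width : Int), Dom_chain_overlaps membership_tests width → Pre_chain_overlaps membership_tests width → Spec_chain_overlaps membership_tests width (chain_overlaps membership_tests width)

-- ===== LEMMAS AND PROOFS =====

-- `mB mt i` : membership flag at index i, false at or beyond the end of the list.
def mB (mt : List (Bool × String)) (i : Int) : Bool :=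
  if (mt.length : Int) ≤ i then false
  else ((PySem.List.pyGet? mt i).map Prod.fst).getD false

-- the chain starting at index i, stepping by w, with explicit fuel
def walkF (mt : List (Bool × String)) (w : Int) (fuel : Nat) (i : Int) : List Int :=
  match fuel with
  | 0 => []
  | Nat.succ f => if mB mt i then i :: walkF mt w f (i + w) else []

def walk (mt : List (Bool × String)) (w : Int) (i : Int) : List Int :=
  walkF mt w (mt.length + 1) i

def segFn (mt : List (Bool × String)) : Int → String :=
  fun i => ((PySem.List.pyGet? mt i).map Prod.snd).getD ""

def startB (mt : List (Bool × String)) (w : Int) (i : Int) : Bool :=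
  mB mt i && (decide (i < w) || !(mB mt (i - w)))

def startsUpTo (mt : List (Bool × String)) (w : Int) (k : Int) : List Int :=
  (PySem.List.pyRange 0 k 1).filter (startB mt w)

def matchesSpec (mt : List (Bool × String)) (w : Int) (k : Int) : List (List String) :=
  (startsUpTo mt w k).map (fun s => (walk mt w s).map (segFn mt))

def idxsSpec (mt : List (Bool × String)) (w : Int) (k : Int) : List (List Int) :=
  (startsUpTo mt w k).map (walk mt w)

theorem mB_true_lt (mt : List (Bool × String)) (i : Int) (h : mB mt i = true) :
    i < (mt.length : Int) := by
  by_contra hge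
  simp [mB, if_pos (by omega : (mt.length : Int) ≤ i)] at h

theorem mB_eq_of_lt (mt : List (Bool × String)) (i : Int) (h : i < (mt.length : Int)) :
    mB mt i = ((PySem.List.pyGet? mt i).map Prod.fst).getD false := by
  simp [mB, if_neg (by omega : ¬ (mt.length : Int) ≤ i)]

theorem walkF_eq_nil (mt : List (Bool × String)) (w : Int) (f : Nat) (i : Int)
    (h : mB mt i = false) : walkF mt w f i = [] := by
  cases f <;> simp [walkF, h]

theorem check_chain_eq (mt : List (Bool × String)) (w : Int) (hw : 1 ≤ w) :
    ∀ (f : Nat) (i : Int) (acc : List Int), 0 ≤ i →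
      check_chain mt i w acc f = acc ++ walkF mt w f i := by
  intro f
  induction f with
  | zero => intro i acc hi; simp [check_chain, walkF]
  | succ f ih =>
    intro i acc hi
    by_cases hni : (mt.length : Int) ≤ i
    · simp [check_chain, walkF, mB, hni]
    · cases hget : PySem.List.pyGet? mt i with
      | none => simp [check_chain, walkF, mB, hni, hget]
      | some p =>
        obtain ⟨b, s⟩ := p
        cases b
        · simp [check_chain, walkF, mB, hni, hget]
        · simp only [check_chain, if_neg hni, hget]
          rw [ih (i + w) (acc ++ [i]) (by omega)]
          simp [walkF, mB, hni, hget]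

theorem walkF_fuel (mt : List (Bool × String)) (w : Int) (hw : 1 ≤ w) :
    ∀ (f g : Nat) (i : Int), 0 ≤ i →
      ((mt.length : Int) - i).toNat ≤ f → ((mt.length : Int) - i).toNat ≤ g →
      walkF mt w f i = walkF mt w g i := by
  intro f
  induction f with
  | zero =>
    intro g i hi hf hg
    have hge : (mt.length : Int) ≤ i := by omega
    rw [walkF_eq_nil mt w 0 i (by simp [mB, hge]), walkF_eq_nil mt w g i (by simp [mB, hge])]
  | succ f ih =>
    intro g i hi hf hg
    by_cases hm : mB mt i = true
    · have hlt : i < (mt.length : Int) := mB_true_lt mt i hm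
      cases g with
      | zero => omega
      | succ g' =>
        simp only [walkF, hm, if_true]
        rw [ih g' (i + w) (by omega) (by omega) (by omega)]
    · have hm' : mB mt i = false := by simpa using hm
      rw [walkF_eq_nil mt w _ i hm', walkF_eq_nil mt w g i hm']

theorem walk_eq (mt : List (Bool × String)) (w : Int) (hw : 1 ≤ w) (i : Int) (hi : 0 ≤ i) :
    walk mt w i = if mB mt i then i :: walk mt w (i + w) else [] := by
  show walkF mt w (mt.length + 1) i = _
  by_cases hm : mB mt i = true
  · simp only [walkF, hm, if_true]
    rw [walkF_fuel mt w hw mt.length (mt.length + 1) (i + w) (by omega) (by omega) (by omega)]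
    rfl
  · have hm' : mB mt i = false := by simpa using hm
    simp [walkF, hm']

theorem mem_walk_iff (mt : List (Bool × String)) (w : Int) (hw : 1 ≤ w) (i j : Int) (hi : 0 ≤ i) :
    j ∈ walk mt w i ↔ ∃ t : Nat, j = i + t * w ∧ ∀ r : Nat, r ≤ t → mB mt (i + r * w) = true := by
  constructor
  · have aux : ∀ (f : Nat) (i : Int), 0 ≤ i → j ∈ walkF mt w f i →
        ∃ t : Nat, j = i + t * w ∧ ∀ r : Nat, r ≤ t → mB mt (i + r * w) = true := by
      intro f
      induction f with
      | zero => intro i hi hj; simp [walkF] at hj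
      | succ f ih =>
        intro i hi hj
        by_cases hm : mB mt i = true
        · simp only [walkF, hm, if_true, List.mem_cons] at hj
          rcases hj with hj | hj
          · exact ⟨0, by simpa using hj, by intro r hr; interval_cases r; simpa using hm⟩
          · obtain ⟨t, ht, hall⟩ := ih (i + w) (by omega) hj
            refine ⟨t + 1, by push_cast; linarith [ht], ?_⟩
            intro r hr
            cases r with
            | zero => simpa using hm
            | succ s =>
              have := hall s (by omega)
              have harith : i + (↑(s + 1) : Int) * w = i + w + (s : Int) * w := by push_cast; ring
              rw [harith]
              exact this
        · have hm' : mB mt i = false := by simpa using hm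
          rw [walkF_eq_nil mt w _ i hm'] at hj
          simp at hj
    exact aux (mt.length + 1) i hi
  · rintro ⟨t, ht, hall⟩
    revert hi
    induction t generalizing i with
    | zero =>
      intro hi
      have hm : mB mt i = true := by simpa using hall 0 (le_refl 0)
      rw [walk_eq mt w hw i hi, if_pos hm]
      simp at ht
      simp [ht]
    | succ t ih =>
      intro hi
      have hm : mB mt i = true := by simpa using hall 0 (by omega)
      rw [walk_eq mt w hw i hi, if_pos hm]
      refine List.mem_cons_of_mem _ (ih (i + w) ?_ ?_ (by omega))
      · push_cast at ht ⊢; linarith [ht]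
      · intro r hr
        have := hall (r + 1) (by omega)
        have harith : i + w + (r : Int) * w = i + (↑(r + 1) : Int) * w := by push_cast; ring
        rw [harith]
        exact this

theorem walk_extend (mt : List (Bool × String)) (w : Int) (hw : 1 ≤ w) (s j : Int) (hs : 0 ≤ s)
    (hj : j ∈ walk mt w s) (hm : mB mt (j + w) = true) : j + w ∈ walk mt w s := by
  rw [mem_walk_iff mt w hw s j hs] at hj
  obtain ⟨t, ht, hall⟩ := hj
  rw [mem_walk_iff mt w hw s (j + w) hs]
  refine ⟨t + 1, by push_cast; linarith [ht], ?_⟩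
  intro r hr
  rcases Nat.lt_or_ge r (t + 1) with h | h
  · exact hall r (by omega)
  · have hr' : r = t + 1 := by omega
    subst hr'
    have harith : s + (↑(t + 1) : Int) * w = j + w := by push_cast; linarith [ht]
    rw [harith]
    exact hm

theorem cover_fwd (mt : List (Bool × String)) (w : Int) (hw : 1 ≤ w) (s k : Int) (hs : 0 ≤ s)
    (hsk : s < k) (hk : k ∈ walk mt w s) :
    mB mt k = true ∧ w ≤ k ∧ mB mt (k - w) = true := by
  rw [mem_walk_iff mt w hw s k hs] at hk
  obtain ⟨t, ht, hall⟩ := hk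
  cases t with
  | zero => simp at ht; omega
  | succ t =>
    have h1 : mB mt k = true := by
      have := hall (t + 1) (le_refl _)
      rwa [← ht] at this
    have h2 : mB mt (k - w) = true := by
      have := hall t (by omega)
      have harith : s + (t : Int) * w = k - w := by push_cast at ht ⊢; linarith [ht]
      rwa [harith] at this
    have htw : (0 : Int) ≤ (t : Int) * w :=
      mul_nonneg (Int.natCast_nonneg t) (by omega)
    have : w ≤ k := by push_cast at ht; nlinarith [ht]
    exact ⟨h1, this, h2⟩

theorem cover_bwd (mt : List (Bool × String)) (w : Int) (hw : 1 ≤ w) :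
    ∀ (K : Nat) (k : Int), k.toNat ≤ K → 0 ≤ k → mB mt k = true → w ≤ k → mB mt (k - w) = true →
      ∃ s, 0 ≤ s ∧ s < k ∧ startB mt w s = true ∧ k ∈ walk mt w s := by
  intro K
  induction K with
  | zero => intro k hK hk0 _ hwk _; omega
  | succ K ih =>
    intro k hK hk0 hmk hwk hmp
    by_cases hst : startB mt w (k - w) = true
    · refine ⟨k - w, by omega, by omega, hst, ?_⟩
      rw [mem_walk_iff mt w hw (k - w) k (by omega)]
      refine ⟨1, by push_cast; ring, ?_⟩
      intro r hr
      interval_cases r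
      · simpa using hmp
      · have harith : k - w + (↑(1 : Nat) : Int) * w = k := by push_cast; ring
        rw [harith]
        exact hmk
    · have hsplit : ¬ (k - w < w) ∧ mB mt (k - w - w) = true := by
        simp only [startB, hmp, Bool.true_and, Bool.or_eq_true, decide_eq_true_eq,
          Bool.not_eq_true'] at hst
        have h1 := not_or.mp hst
        exact ⟨h1.1, by simpa using h1.2⟩
      obtain ⟨s, hs0, hsk, hss, hsw⟩ :=
        ih (k - w) (by omega) (by omega) hmp (by omega) hsplit.2
      have : k - w + w ∈ walk mt w s := by
        apply walk_extend mt w hw s (k - w) hs0 hsw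
        have harith : k - w + w = k := by ring
        rw [harith]
        exact hmk
      refine ⟨s, hs0, by omega, hss, ?_⟩
      have harith : k - w + w = k := by ring
      rwa [harith] at this

theorem starts_succ (mt : List (Bool × String)) (w : Int) (k : Int) (hk : 0 ≤ k) :
    startsUpTo mt w (k + 1) = startsUpTo mt w k ++ (if startB mt w k then [k] else []) := by
  unfold startsUpTo
  rw [PySem.List.pyRange_one_succ_right hk, List.filter_append]
  simp [List.filter_singleton]

theorem startsUpTo_zero (mt : List (Bool × String)) (w : Int) : startsUpTo mt w 0 = [] := by
  simp [startsUpTo, PySem.List.pyRange_one_eq_nil (le_refl (0 : Int))]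

theorem mem_startsUpTo (mt : List (Bool × String)) (w : Int) (k s : Int) :
    s ∈ startsUpTo mt w k ↔ (0 ≤ s ∧ s < k) ∧ startB mt w s = true := by
  simp [startsUpTo, List.mem_filter, PySem.List.mem_pyRange_one]

theorem startB_false_of_found (mt : List (Bool × String)) (w : Int) (hw : 1 ≤ w) (k : Int)
    (h2 : w ≤ k) (h3 : mB mt (k - w) = true) : startB mt w k = false := by
  simp only [startB, h3, Bool.not_true, Bool.or_false]
  simp only [decide_eq_false (by omega : ¬ k < w)]
  simp

theorem A_inv (mt : List (Bool × String)) (w : Int) (hw : 1 ≤ w) :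
    ∀ k : Nat, k ≤ mt.length →
      ∃ Fnd : PySem.Set Int,
        ((PySem.List.enumerate mt 0).take k).foldl
          (fun st p =>
            if PySem.Set.contains st.1 p.1 then st
            else
              let run := check_chain mt p.1 w [] (mt.length + 1)
              if run.length = 0 then st
              else (PySem.Set.update st.1 run,
                    st.2.1 ++ [run.map (fun i => ((PySem.List.pyGet? mt i).map Prod.snd).getD "")],
                    st.2.2 ++ [run]))
          ((PySem.Set.empty : PySem.Set Int), (([] : List (List String)), ([] : List (List Int))))
        = (Fnd, matchesSpec mt w k, idxsSpec mt w k)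
        ∧ ∀ j : Int, j ∈ Fnd ↔ ∃ s ∈ startsUpTo mt w (k : Int), j ∈ walk mt w s := by
  intro k
  induction k with
  | zero =>
    intro _
    refine ⟨PySem.Set.empty, ?_, ?_⟩
    · simp [matchesSpec, idxsSpec, startsUpTo_zero]
    · intro j
      simp [startsUpTo_zero, PySem.Set.empty]
  | succ k ih =>
    intro hk1
    have hk : k < mt.length := by omega
    obtain ⟨Fnd, hfold, hmem⟩ := ih (by omega)
    have hcast : (((k + 1 : Nat)) : Int) = (k : Int) + 1 := by push_cast; ring
    have htake : (PySem.List.enumerate mt 0).take (k + 1)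
        = (PySem.List.enumerate mt 0).take k ++ [((k : Int), mt[k])] := by
      rw [List.take_succ]
      congr 1
      rw [PySem.List.getElem?_enumerate]
      simp [List.getElem?_eq_getElem hk]
    rw [htake, List.foldl_append, hfold]
    by_cases hc : ((k : Int)) ∈ Fnd
    · have hcc : PySem.Set.contains Fnd (k : Int) = true := (PySem.Set.contains_iff Fnd (k : Int)).mpr hc
      obtain ⟨s, hsmem, hswalk⟩ := (hmem (k : Int)).mp hc
      obtain ⟨⟨hs0, hsk⟩, hsb⟩ := (mem_startsUpTo mt w _ s).mp hsmem
      obtain ⟨hmk, hwk, hmkw⟩ := cover_fwd mt w hw s (k : Int) hs0 hsk hswalk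
      have hsbk : startB mt w (k : Int) = false := startB_false_of_found mt w hw _ hwk hmkw
      have hstarts : startsUpTo mt w ((k : Int) + 1) = startsUpTo mt w (k : Int) := by
        rw [starts_succ mt w (k : Int) (by positivity), hsbk]
        simp
      refine ⟨Fnd, ?_, ?_⟩
      · simp only [List.foldl_cons, List.foldl_nil, hcc, if_true, matchesSpec, idxsSpec, hcast,
          hstarts]
      · intro j
        rw [hcast, hstarts]
        exact hmem j
    · have hcc : PySem.Set.contains Fnd (k : Int) = false := by
        rw [← Bool.not_eq_true]
        intro hcontra
        exact hc ((PySem.Set.contains_iff Fnd (k : Int)).mp hcontra)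
      have hrun : check_chain mt (k : Int) w [] (mt.length + 1) = walk mt w (k : Int) := by
        rw [check_chain_eq mt w hw (mt.length + 1) (k : Int) [] (by positivity)]
        rfl
      by_cases hm : mB mt (k : Int) = true
      · have hwalkk : walk mt w (k : Int) = (k : Int) :: walk mt w ((k : Int) + w) := by
          rw [walk_eq mt w hw (k : Int) (by positivity), if_pos hm]
        have hsbk : startB mt w (k : Int) = true := by
          by_contra hsb
          have hsb' : startB mt w (k : Int) = false := by simpa using hsb
          simp only [startB, hm, Bool.true_and, Bool.or_eq_false_iff,
            decide_eq_false_iff_not, Bool.not_eq_false'] at hsb'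
          obtain ⟨s, hs0, hsk, hss, hsw⟩ :=
            cover_bwd mt w hw k (k : Int) (by simp) (by positivity) hm (by omega) hsb'.2
          exact hc ((hmem (k : Int)).mpr ⟨s, (mem_startsUpTo mt w _ s).mpr ⟨⟨hs0, hsk⟩, hss⟩, hsw⟩)
        have hstarts : startsUpTo mt w ((k : Int) + 1)
            = startsUpTo mt w (k : Int) ++ [(k : Int)] := by
          rw [starts_succ mt w (k : Int) (by positivity), hsbk]
          simp
        refine ⟨PySem.Set.update Fnd (walk mt w (k : Int)), ?_, ?_⟩
        · simp only [List.foldl_cons, List.foldl_nil, hcc, Bool.false_eq_true, if_false, hrun]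
          rw [if_neg (by simp [hwalkk])]
          simp only [matchesSpec, idxsSpec, hcast, hstarts, List.map_append, List.map_cons,
            List.map_nil]
          rfl
        · intro j
          rw [PySem.Set.mem_update, hcast, hstarts, hmem j]
          constructor
          · rintro (⟨s, hs1, hs2⟩ | hj)
            · exact ⟨s, by simp [hs1], hs2⟩
            · exact ⟨(k : Int), by simp, hj⟩
          · rintro ⟨s, hs1, hs2⟩
            rcases List.mem_append.mp hs1 with h | h
            · exact Or.inl ⟨s, h, hs2⟩
            · simp at h
              subst h
              exact Or.inr hs2
      · have hm' : mB mt (k : Int) = false := by simpa using hm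
        have hwalkk : walk mt w (k : Int) = [] := by
          rw [walk_eq mt w hw (k : Int) (by positivity), if_neg (by simp [hm'])]
        have hsbk : startB mt w (k : Int) = false := by simp [startB, hm']
        have hstarts : startsUpTo mt w ((k : Int) + 1) = startsUpTo mt w (k : Int) := by
          rw [starts_succ mt w (k : Int) (by positivity), hsbk]
          simp
        refine ⟨Fnd, ?_, ?_⟩
        · simp only [List.foldl_cons, List.foldl_nil, hcc, Bool.false_eq_true, if_false, hrun,
            hwalkk]
          simp [matchesSpec, idxsSpec, hcast, hstarts]
        · intro j
          rw [hcast, hstarts]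
          exact hmem j

theorem chain_overlaps_spec_aux (mt : List (Bool × String)) (w : Int) (hw : 1 ≤ w) :
    chain_overlaps mt w = (matchesSpec mt w mt.length, idxsSpec mt w mt.length) := by
  obtain ⟨Fnd, hfold, -⟩ := A_inv mt w hw mt.length (le_refl _)
  rw [List.take_of_length_le (by simp [PySem.List.length_enumerate])] at hfold
  simp only [chain_overlaps, hfold]

def DFrom (mt : List (Bool × String)) (w : Int) (k : Int) : PySem.Dict Int (List Int) :=
  (PySem.List.pyRange k (mt.length) 1).foldr
    (fun ix d =>
      if ((PySem.List.pyGet? mt ix).map Prod.fst).getD false then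
        PySem.Dict.insert d ix (ix :: PySem.Dict.getD d (ix + w) [])
      else d)
    PySem.Dict.empty

theorem DFrom_ge (mt : List (Bool × String)) (w k : Int) (h : (mt.length : Int) ≤ k) :
    DFrom mt w k = PySem.Dict.empty := by
  simp [DFrom, PySem.List.pyRange_one_eq_nil h]

theorem DFrom_step (mt : List (Bool × String)) (w k : Int) (h : k < (mt.length : Int)) :
    DFrom mt w k =
      (if ((PySem.List.pyGet? mt k).map Prod.fst).getD false then
        PySem.Dict.insert (DFrom mt w (k + 1)) k
          (k :: PySem.Dict.getD (DFrom mt w (k + 1)) (k + w) [])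
      else DFrom mt w (k + 1)) := by
  rw [DFrom, PySem.List.pyRange_one_cons h, List.foldr_cons]
  rfl

theorem D_get (mt : List (Bool × String)) (w : Int) (hw : 1 ≤ w) :
    ∀ (d : Nat) (k : Int), 0 ≤ k → ((mt.length : Int) - k).toNat ≤ d →
      ∀ i : Int, PySem.Dict.get? (DFrom mt w k) i
        = if k ≤ i ∧ mB mt i = true then some (walk mt w i) else none := by
  intro d
  induction d with
  | zero =>
    intro k hk0 hkd i
    rw [DFrom_ge mt w k (by omega), PySem.Dict.get?_empty, if_neg]
    rintro ⟨h1, h2⟩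
    have := mB_true_lt mt i h2
    omega
  | succ d ihd =>
    intro k hk0 hkd i
    by_cases hkn : (mt.length : Int) ≤ k
    · rw [DFrom_ge mt w k hkn, PySem.Dict.get?_empty, if_neg]
      rintro ⟨h1, h2⟩
      have := mB_true_lt mt i h2
      omega
    · rw [DFrom_step mt w k (by omega),
        show ((PySem.List.pyGet? mt k).map Prod.fst).getD false = mB mt k from
          (mB_eq_of_lt mt k (by omega)).symm]
      by_cases hm : mB mt k = true
      · rw [if_pos hm]
        have hv : PySem.Dict.getD (DFrom mt w (k + 1)) (k + w) [] = walk mt w (k + w) := by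
          rw [PySem.Dict.getD_eq_get?_getD, ihd (k + 1) (by omega) (by omega) (k + w)]
          by_cases hmw : mB mt (k + w) = true
          · rw [if_pos ⟨by omega, hmw⟩]
            rfl
          · rw [if_neg (by rintro ⟨_, h⟩; exact hmw h), walk_eq mt w hw (k + w) (by omega),
              if_neg (by simp [hmw])]
            rfl
        have hvk : (k :: PySem.Dict.getD (DFrom mt w (k + 1)) (k + w) []) = walk mt w k := by
          rw [hv, walk_eq mt w hw k hk0, if_pos hm]
        rw [PySem.Dict.get?_insert, hvk]
        by_cases hik : i = k
        · subst hik
          rw [if_pos rfl, if_pos ⟨le_refl i, hm⟩]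
        · rw [if_neg hik, ihd (k + 1) (by omega) (by omega) i,
            if_congr (show (k + 1 ≤ i ∧ mB mt i = true) ↔ (k ≤ i ∧ mB mt i = true) from
              ⟨fun ⟨a, b⟩ => ⟨by omega, b⟩, fun ⟨a, b⟩ => ⟨by omega, b⟩⟩) rfl rfl]
      · rw [if_neg hm, ihd (k + 1) (by omega) (by omega) i]
        have hiff : (k + 1 ≤ i ∧ mB mt i = true) ↔ (k ≤ i ∧ mB mt i = true) := by
          constructor
          · rintro ⟨a, b⟩; exact ⟨by omega, b⟩
          · rintro ⟨a, b⟩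
            refine ⟨?_, b⟩
            rcases eq_or_lt_of_le a with h | h
            · exact absurd b (by rw [h] at hm; exact hm)
            · omega
        rw [if_congr hiff rfl rfl]

theorem B_out (mt : List (Bool × String)) (w : Int) (hw : 1 ≤ w)
    (c : PySem.Dict Int (List Int))
    (hc : ∀ i : Int, PySem.Dict.get? c i
      = if 0 ≤ i ∧ mB mt i = true then some (walk mt w i) else none) :
    ∀ k : Nat, (PySem.List.pyRange 0 (k : Int) 1).foldl
      (fun st ix =>
        match PySem.Dict.get? c ix with
        | none => st
        | some run =>
          if decide (ix < w) || !(((PySem.List.pyGet? mt (ix - w)).map Prod.fst).getD false) then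
            (st.1 ++ [run.map (fun i => ((PySem.List.pyGet? mt i).map Prod.snd).getD "")],
             st.2 ++ [run])
          else st)
      (([] : List (List String)), ([] : List (List Int)))
    = (matchesSpec mt w (k : Int), idxsSpec mt w (k : Int)) := by
  intro k
  induction k with
  | zero =>
    simp [matchesSpec, idxsSpec, startsUpTo_zero,
      PySem.List.pyRange_one_eq_nil (le_refl (0 : Int))]
  | succ k ihk =>
    have hcast : (((k + 1 : Nat)) : Int) = (k : Int) + 1 := by push_cast; ring
    rw [hcast, PySem.List.pyRange_one_succ_right (by positivity), List.foldl_append, ihk,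
      List.foldl_cons, List.foldl_nil]
    by_cases hm : mB mt (k : Int) = true
    · rw [hc (k : Int), if_pos ⟨by positivity, hm⟩]
      simp only []
      have hcnd : (decide ((k : Int) < w)
          || !(((PySem.List.pyGet? mt ((k : Int) - w)).map Prod.fst).getD false))
          = startB mt w (k : Int) := by
        by_cases hlt : (k : Int) < w
        · simp [startB, hm, hlt]
        · have hlt2 : (k : Int) - w < (mt.length : Int) := by
            have := mB_true_lt mt (k : Int) hm
            omega
          rw [← mB_eq_of_lt mt ((k : Int) - w) hlt2]
          simp [startB, hm, hlt]
      rw [hcnd]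
      by_cases hsb : startB mt w (k : Int) = true
      · rw [if_pos hsb]
        simp only [matchesSpec, idxsSpec, starts_succ mt w (k : Int) (by positivity), hsb,
          if_true, List.map_append, List.map_cons, List.map_nil]
        rfl
      · rw [if_neg (by simpa using hsb)]
        have hsb' : startB mt w (k : Int) = false := by simpa using hsb
        simp [matchesSpec, idxsSpec, starts_succ mt w (k : Int) (by positivity), hsb']
    · rw [hc (k : Int), if_neg (by rintro ⟨_, h⟩; exact hm h)]
      simp only []
      have hsb' : startB mt w (k : Int) = false := by
        simp [startB, by simpa using hm]
      simp [matchesSpec, idxsSpec, starts_succ mt w (k : Int) (by positivity), hsb']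

theorem chain_overlaps_alt_spec_aux (mt : List (Bool × String)) (w : Int) (hw : 1 ≤ w) :
    chain_overlaps_alt mt w = (matchesSpec mt w mt.length, idxsSpec mt w mt.length) := by
  have hch : (PySem.List.pyRange ((mt.length : Int) - 1) (-1) (-1)).foldl
      (fun d ix =>
        if ((PySem.List.pyGet? mt ix).map Prod.fst).getD false then
          PySem.Dict.insert d ix (ix :: PySem.Dict.getD d (ix + w) [])
        else d)
      PySem.Dict.empty = DFrom mt w 0 := by
    rw [PySem.List.pyRange_neg_one_eq_reverse, List.foldl_reverse]
    norm_num [DFrom]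
  have hc : ∀ i : Int, PySem.Dict.get? (DFrom mt w 0) i
      = if 0 ≤ i ∧ mB mt i = true then some (walk mt w i) else none := by
    intro i
    exact D_get mt w hw mt.length 0 (le_refl _) (by omega) i
  have := B_out mt w hw (DFrom mt w 0) hc mt.length
  simp only [chain_overlaps_alt, hch]
  exact this

-- ===== VERDICT (by name: the statement is the Claim_ definition above) =====
theorem chain_overlaps_spec : Claim_equal_chain_overlaps := by
  intro mt w _ hw
  unfold Spec_chain_overlaps
  rw [chain_overlaps_spec_aux mt w hw, chain_overlaps_alt_spec_aux mt w hw]
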